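-- pv_equiv track=rewrite | github.com/mdc159/studio54 | modules/autoreason/experiments/v2/run_ablations.py | aggregate_borda
-- ===== SOURCE A (Python) =====
-- def aggregate_borda(rankings, labels, tiebreak=None):
--     scores = {l: 0 for l in labels}
--     n = len(labels)
--     valid = [r for r in rankings if r is not None]
--     for ranking in valid:
--         for pos, label in enumerate(ranking):
--             if label in scores and pos < n:
--                 scores[label] += (n - pos)
--     if tiebreak:
--         ranked = sorted(scores.keys(), key=lambda k: (-scores[k], 0 if k == tiebreak else 1))
--     else:
--         ranked = sorted(scores.keys(), key=lambda k: -scores[k])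
--     return ranked[0], scores, valid
-- ===== SOURCE B (Python) =====
-- def aggregate_borda(rankings, labels, tiebreak=None):
--     scores = {l: 0 for l in labels}
--     n = len(labels)
--     valid = []
--     for r in rankings:
--         if r is None:
--             continue
--         valid.append(r)
--         for pos, label in enumerate(r[:n]):
--             if label in scores:
--                 scores[label] += n - pos
--     best_k, best_s, best_p = None, 0, 0
--     for k, s in scores.items():
--         p = 1 if (tiebreak and k == tiebreak) else 0
--         if best_k is None or s > best_s or (s == best_s and p > best_p):
--             best_k, best_s, best_p = k, s, p
--     return best_k, scores, valid
-- ===== Notes on version B (the rewrite author's own statement) =====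
-- stated objective: alternative
-- what changed: B filters and scores in one pass over rankings (slicing each ranking to the first n places instead of guarding positions) and extracts the winner with a single linear best-so-far scan over the score table instead of A's full sort followed by taking element 0.
import Mathlib
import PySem

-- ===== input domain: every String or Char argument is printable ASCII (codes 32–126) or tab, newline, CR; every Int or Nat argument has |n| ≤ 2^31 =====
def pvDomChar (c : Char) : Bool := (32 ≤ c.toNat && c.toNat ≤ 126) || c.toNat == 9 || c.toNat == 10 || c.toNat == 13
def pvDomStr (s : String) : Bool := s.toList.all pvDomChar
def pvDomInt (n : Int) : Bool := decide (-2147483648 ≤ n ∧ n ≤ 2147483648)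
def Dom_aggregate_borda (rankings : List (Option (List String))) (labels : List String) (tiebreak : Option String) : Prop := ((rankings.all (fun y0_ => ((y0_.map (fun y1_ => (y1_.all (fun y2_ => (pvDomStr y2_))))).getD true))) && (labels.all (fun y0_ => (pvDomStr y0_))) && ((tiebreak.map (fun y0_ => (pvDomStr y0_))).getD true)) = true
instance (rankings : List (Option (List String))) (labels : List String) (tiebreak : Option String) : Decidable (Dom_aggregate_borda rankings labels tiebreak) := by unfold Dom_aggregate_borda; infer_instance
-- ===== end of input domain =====

-- B scores valid rankings in a single filtering pass (slicing each ranking to the first n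
-- places) and picks the winner with one linear best-so-far scan instead of A's sort-then-take-head;
-- same return value wherever A returns (labels ≠ []).

-- ===== PORT A =====
def aggregate_borda (rankings : List (Option (List String))) (labels : List String) (tiebreak : Option String) : String × (List (String × Int)) × List (List String) :=
  let scores0 : PySem.Dict String Int := labels.foldl (fun d l => d.insert l 0) PySem.Dict.empty
  let n : Int := (labels.length : Int)
  let valid : List (List String) := rankings.filterMap id
  let scores : PySem.Dict String Int := valid.foldl (fun d ranking =>
    (PySem.List.enumerate ranking).foldl (fun d pl =>
      if d.contains pl.2 && decide (pl.1 < n) then d.modify pl.2 0 (fun v => v + (n - pl.1)) else d) d) scores0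
  let ranked : List String :=
    match tiebreak with
    | some t =>
        if t ≠ "" then
          PySem.List.sorted2 scores.keys (fun k => -(scores.getD k 0)) (fun k => if k = t then (0 : Int) else 1)
        else
          PySem.List.sorted scores.keys (fun k => -(scores.getD k 0))
    | none => PySem.List.sorted scores.keys (fun k => -(scores.getD k 0))
  ((PySem.List.pyGet? ranked 0).getD "", scores.items, valid)

-- ===== PORT B =====
def aggregate_borda_alt (rankings : List (Option (List String))) (labels : List String) (tiebreak : Option String) : String × (List (String × Int)) × List (List String) :=
  let scores0 : PySem.Dict String Int := labels.foldl (fun d l => d.insert l 0) PySem.Dict.empty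
  let n : Int := (labels.length : Int)
  let sv : PySem.Dict String Int × List (List String) := rankings.foldl (fun sv r =>
    match r with
    | none => sv
    | some r =>
      ((PySem.List.enumerate (PySem.List.slice r none (some n))).foldl (fun d pl =>
        if d.contains pl.2 then d.modify pl.2 0 (fun v => v + (n - pl.1)) else d) sv.1,
       sv.2 ++ [r])) (scores0, [])
  let best : Option String × Int × Int := sv.1.items.foldl (fun b ks =>
    let p : Int := match tiebreak with
      | some t => if t ≠ "" ∧ ks.1 = t then 1 else 0
      | none => 0
    if b.1 = none ∨ ks.2 > b.2.1 ∨ (ks.2 = b.2.1 ∧ p > b.2.2) then (some ks.1, ks.2, p) else b)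
    (none, 0, 0)
  (best.1.getD "", sv.1.items, sv.2)

-- ===== PRECONDITION & SPEC =====
-- Pre_ excludes exactly labels = [], where the Python A raises IndexError on ranked[0].
def Pre_aggregate_borda (rankings : List (Option (List String))) (labels : List String) (tiebreak : Option String) : Prop := labels ≠ []
instance (rankings : List (Option (List String))) (labels : List String) (tiebreak : Option String) : Decidable (Pre_aggregate_borda rankings labels tiebreak) := by unfold Pre_aggregate_borda; infer_instance
def pvWitness_aggregate_borda : List (Option (List String)) × List String × Option String := ([some ["b", "a"], none, some ["a"]], ["a", "b"], some "b")

def Spec_aggregate_borda (rankings : List (Option (List String))) (labels : List String) (tiebreak : Option String) (out : String × (List (String × Int)) × List (List String)) : Prop := out = aggregate_borda_alt rankings labels tiebreak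
instance (rankings : List (Option (List String))) (labels : List String) (tiebreak : Option String) (out : String × (List (String × Int)) × List (List String)) : Decidable (Spec_aggregate_borda rankings labels tiebreak out) := by unfold Spec_aggregate_borda; infer_instance

-- ===== CLAIM (what is proved, stated in full; the proofs are below) =====
def Claim_equal_aggregate_borda : Prop := ∀ (rankings : List (Option (List String))) (labels : List String) (tiebreak : Option String), Dom_aggregate_borda rankings labels tiebreak → Pre_aggregate_borda rankings labels tiebreak → Spec_aggregate_borda rankings labels tiebreak (aggregate_borda rankings labels tiebreak)

-- ===== LEMMAS AND PROOFS =====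

-- 1. head of insertBy
theorem head?_insertBy {α : Type} (before : α → α → Bool) (x : α) (acc : List α) :
    (PySem.List.insertBy before x acc).head? =
      some (match acc.head? with | none => x | some h => if before x h then x else h) := by
  cases acc with
  | nil => simp [PySem.List.insertBy]
  | cons y ys => by_cases h : before x y <;> simp [PySem.List.insertBy, h]

def minScan {α : Type} (before : α → α → Bool) (xs : List α) (b : Option α) : Option α :=
  xs.foldl (fun ob x => match ob with | none => some x | some h => if before x h then some x else some h) b

theorem foldl_insertBy_head? {α : Type} (before : α → α → Bool) (xs : List α) :
    ∀ acc : List α, (xs.foldl (fun acc x => PySem.List.insertBy before x acc) acc).head? =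
      minScan before xs acc.head? := by
  induction xs with
  | nil => intro acc; rfl
  | cons x xs ih =>
      intro acc
      rw [List.foldl_cons, ih]
      simp only [minScan, List.foldl_cons, head?_insertBy]
      cases acc.head? with
      | none => rfl
      | some h => by_cases hb : before x h <;> simp [hb]

-- 3. inner loop: guarded enumerate fold = unguarded fold over the first (n - a) entries
theorem guarded_fold_id (n : Int) (r : List String) : ∀ (a : Int), n ≤ a → ∀ (d : PySem.Dict String Int),
    (PySem.List.enumerate r a).foldl (fun d pl =>
      if d.contains pl.2 && decide (pl.1 < n) then d.modify pl.2 0 (fun v => v + (n - pl.1)) else d) d = d := by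
  induction r with
  | nil => intros; rfl
  | cons x xs ih =>
      intro a ha d
      rw [PySem.List.enumerate_cons, List.foldl_cons]
      have hna : ¬ (a < n) := by omega
      simp only [hna, decide_false, Bool.and_false, Bool.false_eq_true, if_false]
      exact ih (a + 1) (by omega) d

theorem inner_eq (n : Int) (r : List String) : ∀ (a : Int) (d : PySem.Dict String Int),
    (PySem.List.enumerate r a).foldl (fun d pl =>
      if d.contains pl.2 && decide (pl.1 < n) then d.modify pl.2 0 (fun v => v + (n - pl.1)) else d) d
    = (PySem.List.enumerate (r.take (n - a).toNat) a).foldl (fun d pl =>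
      if d.contains pl.2 then d.modify pl.2 0 (fun v => v + (n - pl.1)) else d) d := by
  induction r with
  | nil => intro a d; simp [PySem.List.enumerate_nil]
  | cons x xs ih =>
      intro a d
      by_cases h : a < n
      · have ht : (n - a).toNat = (n - (a + 1)).toNat + 1 := by omega
        rw [ht, List.take_succ_cons, PySem.List.enumerate_cons, PySem.List.enumerate_cons,
          List.foldl_cons, List.foldl_cons]
        simp only [h, decide_true, Bool.and_true]
        exact ih (a + 1) _
      · have ht : (n - a).toNat = 0 := by omega
        rw [ht, List.take_zero, PySem.List.enumerate_cons, List.foldl_cons, PySem.List.enumerate_nil,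
          List.foldl_nil]
        simp only [h, decide_false, Bool.and_false, Bool.false_eq_true, if_false]
        exact guarded_fold_id n xs (a + 1) (by omega) d

-- 4. the one-pass filter-and-fold of B equals filterMap-then-fold
theorem outer_eq {σ : Type} (step : σ → List String → σ) :
    ∀ (rankings : List (Option (List String))) (d : σ) (vs : List (List String)),
    rankings.foldl (fun sv r => match r with
      | none => sv
      | some r => (step sv.1 r, sv.2 ++ [r])) (d, vs)
    = ((rankings.filterMap id).foldl step d, vs ++ rankings.filterMap id) := by
  intro rankings
  induction rankings with
  | nil => intro d vs; simp
  | cons r rs ih =>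
      intro d vs
      cases r with
      | none => simpa using ih d vs
      | some r => simp [ih]

-- 5. the unguarded inner fold never changes the key list
theorem keys_guarded_fold (n : Int) : ∀ (l : List (Int × String)) (d : PySem.Dict String Int),
    (l.foldl (fun d pl => if d.contains pl.2 then d.modify pl.2 0 (fun v => v + (n - pl.1)) else d) d).keys = d.keys := by
  intro l
  induction l with
  | nil => intro d; rfl
  | cons p ps ih =>
      intro d
      rw [List.foldl_cons]
      by_cases h : d.contains p.2
      · rw [if_pos h, ih, PySem.Dict.keys_modify, PySem.Dict.keys_insert_of_contains _ _ h]
      · rw [if_neg (by simp [h]), ih]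

theorem keys_scores (n : Int) : ∀ (valid : List (List String)) (d : PySem.Dict String Int),
    (valid.foldl (fun d r => (PySem.List.enumerate (PySem.List.slice r none (some n))).foldl (fun d pl =>
      if d.contains pl.2 then d.modify pl.2 0 (fun v => v + (n - pl.1)) else d) d) d).keys = d.keys := by
  intro valid
  induction valid with
  | nil => intro d; rfl
  | cons r rs ih => intro d; rw [List.foldl_cons, ih, keys_guarded_fold]

-- 6. B's best-so-far scan computes the first minimum of the sort order
def encodeBest (S P : String → Int) : Option String → Option String × Int × Int
  | none => (none, 0, 0)
  | some k => (some k, S k, P k)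

theorem encodeBest_fst (S P : String → Int) (o : Option String) : (encodeBest S P o).1 = o := by
  cases o <;> rfl

theorem scanB_eq (S P : String → Int) (lt : String → String → Bool)
    (hlt : ∀ x b, lt x b = decide (S x > S b ∨ (S x = S b ∧ P x > P b))) :
    ∀ (ks : List String) (ob : Option String),
    ks.foldl (fun b x => if b.1 = none ∨ S x > b.2.1 ∨ (S x = b.2.1 ∧ P x > b.2.2)
        then (some x, S x, P x) else b) (encodeBest S P ob)
    = encodeBest S P (minScan lt ks ob) := by
  intro ks
  induction ks with
  | nil => intro ob; rfl
  | cons x xs ih =>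
      intro ob
      cases ob with
      | none =>
          rw [List.foldl_cons]
          have hcond : (encodeBest S P none).1 = none ∨ S x > (encodeBest S P none).2.1 ∨
              ((S x = (encodeBest S P none).2.1) ∧ P x > (encodeBest S P none).2.2) := Or.inl rfl
          rw [if_pos hcond]
          have m : minScan lt (x :: xs) none = minScan lt xs (some x) := by simp [minScan]
          rw [m]
          exact ih (some x)
      | some h =>
          rw [List.foldl_cons]
          by_cases c : S x > S h ∨ (S x = S h ∧ P x > P h)
          · have hcond : (encodeBest S P (some h)).1 = none ∨ S x > (encodeBest S P (some h)).2.1 ∨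
                ((S x = (encodeBest S P (some h)).2.1) ∧ P x > (encodeBest S P (some h)).2.2) := Or.inr c
            rw [if_pos hcond]
            have hl : lt x h = true := by rw [hlt]; exact decide_eq_true c
            have m : minScan lt (x :: xs) (some h) = minScan lt xs (some x) := by simp [minScan, hl]
            rw [m]
            exact ih (some x)
          · have hcond : ¬ ((encodeBest S P (some h)).1 = none ∨ S x > (encodeBest S P (some h)).2.1 ∨
                ((S x = (encodeBest S P (some h)).2.1) ∧ P x > (encodeBest S P (some h)).2.2)) := by
              rintro (hh | hh)
              · simp [encodeBest] at hh
              · exact c hh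
            rw [if_neg hcond]
            have hl : lt x h = false := by rw [hlt]; exact decide_eq_false c
            have m : minScan lt (x :: xs) (some h) = minScan lt xs (some h) := by simp [minScan, hl]
            rw [m]
            exact ih (some h)

theorem pyGet?_zero_head {α : Type} (l : List α) : PySem.List.pyGet? l 0 = l.head? := by
  cases l <;> simp [PySem.List.pyGet?, PySem.List.pyIdx?, List.head?]

-- specialized outer fold
theorem outer_eq_n (n : Int) (rankings : List (Option (List String))) (d : PySem.Dict String Int) (vs : List (List String)) :
    rankings.foldl (fun sv r => match r with
      | none => sv
      | some r => ((PySem.List.enumerate (PySem.List.slice r none (some n))).foldl (fun d pl =>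
          if d.contains pl.2 then d.modify pl.2 0 (fun v => v + (n - pl.1)) else d) sv.1, sv.2 ++ [r])) (d, vs)
    = ((rankings.filterMap id).foldl (fun d r => (PySem.List.enumerate (PySem.List.slice r none (some n))).foldl (fun d pl =>
          if d.contains pl.2 then d.modify pl.2 0 (fun v => v + (n - pl.1)) else d) d) d, vs ++ rankings.filterMap id) :=
  outer_eq (fun d r => (PySem.List.enumerate (PySem.List.slice r none (some n))).foldl (fun d pl =>
          if d.contains pl.2 then d.modify pl.2 0 (fun v => v + (n - pl.1)) else d) d) rankings d vs

theorem innerAB (n : Int) (hn : 0 ≤ n) :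
    (fun (d : PySem.Dict String Int) (ranking : List String) =>
      (PySem.List.enumerate ranking).foldl (fun d pl =>
        if d.contains pl.2 && decide (pl.1 < n) then d.modify pl.2 0 (fun v => v + (n - pl.1)) else d) d)
    = (fun (d : PySem.Dict String Int) (r : List String) =>
      (PySem.List.enumerate (PySem.List.slice r none (some n))).foldl (fun d pl =>
        if d.contains pl.2 then d.modify pl.2 0 (fun v => v + (n - pl.1)) else d) d) := by
  funext d r
  rw [PySem.List.slice_to r hn]
  have := inner_eq n r 0 d
  rw [sub_zero] at this
  exact this


theorem scores_nodup (n : Int) (labels : List String) (valid : List (List String)) :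
    ((valid.foldl (fun d r => (PySem.List.enumerate (PySem.List.slice r none (some n))).foldl (fun d pl =>
      if d.contains pl.2 then d.modify pl.2 0 (fun v => v + (n - pl.1)) else d) d)
      (labels.foldl (fun d l => d.insert l (0 : Int)) PySem.Dict.empty))).keys.Nodup := by
  rw [keys_scores]
  exact PySem.Dict.nodup_keys_foldl_insert labels (fun _ _ => 0) _ PySem.Dict.nodup_keys_empty

theorem winner_eq (scores : PySem.Dict String Int) (hnd : scores.keys.Nodup) (tiebreak : Option String) :
    (PySem.List.pyGet? (match tiebreak with
      | some t =>
          if t ≠ "" then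
            PySem.List.sorted2 scores.keys (fun k => -(scores.getD k 0)) (fun k => if k = t then (0 : Int) else 1)
          else
            PySem.List.sorted scores.keys (fun k => -(scores.getD k 0))
      | none => PySem.List.sorted scores.keys (fun k => -(scores.getD k 0))) 0).getD ""
    = ((scores.items.foldl (fun b ks =>
        let p : Int := match tiebreak with
          | some t => if t ≠ "" ∧ ks.1 = t then 1 else 0
          | none => 0
        if b.1 = none ∨ ks.2 > b.2.1 ∨ (ks.2 = b.2.1 ∧ p > b.2.2) then (some ks.1, ks.2, p) else b)
        ((none, 0, 0) : Option String × Int × Int)).1).getD "" := by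
  rw [pyGet?_zero_head, PySem.Dict.items_eq_map_keys scores hnd 0, List.foldl_map]
  cases tiebreak with
  | none =>
      dsimp only
      rw [PySem.List.sorted_eq_foldl_insertBy, foldl_insertBy_head?]
      have hB := scanB_eq (fun k => scores.getD k 0) (fun _ => (0 : Int))
        (fun a b => decide ((fun k => -(scores.getD k 0)) a < (fun k => -(scores.getD k 0)) b))
        (by intro x b; dsimp only; rw [decide_eq_decide]; omega) scores.keys none
      rw [show (List.foldl (fun b k => if b.1 = none ∨ scores.getD k 0 > b.2.1 ∨ (scores.getD k 0 = b.2.1 ∧ (0:Int) > b.2.2)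
              then (some k, scores.getD k 0, (0:Int)) else b)
            ((none, 0, 0) : Option String × Int × Int) scores.keys) = _ from hB, encodeBest_fst]
      rfl
  | some t =>
      by_cases ht : t = ""
      · subst ht
        dsimp only
        rw [if_neg (by simp)]
        rw [PySem.List.sorted_eq_foldl_insertBy, foldl_insertBy_head?]
        have hB := scanB_eq (fun k => scores.getD k 0) (fun k => if ¬"" = "" ∧ k = "" then (1 : Int) else 0)
          (fun a b => decide ((fun k => -(scores.getD k 0)) a < (fun k => -(scores.getD k 0)) b))
          (by intro x b; dsimp only; rw [decide_eq_decide]; simp) scores.keys none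
        rw [show (List.foldl (fun b k => if b.1 = none ∨ scores.getD k 0 > b.2.1 ∨ (scores.getD k 0 = b.2.1 ∧ (if ¬"" = "" ∧ k = "" then (1:Int) else 0) > b.2.2)
                then (some k, scores.getD k 0, (if ¬"" = "" ∧ k = "" then (1:Int) else 0)) else b)
              ((none, 0, 0) : Option String × Int × Int) scores.keys) = _ from hB, encodeBest_fst]
        rfl
      · dsimp only
        rw [if_pos ht]
        have hs2 : PySem.List.sorted2 scores.keys (fun k => -(scores.getD k 0)) (fun k => if k = t then (0 : Int) else 1)
            = scores.keys.foldl (fun acc x => PySem.List.insertBy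
                (fun a b => decide ((fun k => -(scores.getD k 0)) a < (fun k => -(scores.getD k 0)) b) ||
                  (!decide ((fun k => -(scores.getD k 0)) b < (fun k => -(scores.getD k 0)) a) &&
                    decide ((fun k => if k = t then (0 : Int) else 1) a < (fun k => if k = t then (0 : Int) else 1) b))) x acc) [] := rfl
        rw [hs2, foldl_insertBy_head?]
        have hB := scanB_eq (fun k => scores.getD k 0) (fun k => if ¬t = "" ∧ k = t then (1 : Int) else 0)
          (fun a b => decide ((fun k => -(scores.getD k 0)) a < (fun k => -(scores.getD k 0)) b) ||
            (!decide ((fun k => -(scores.getD k 0)) b < (fun k => -(scores.getD k 0)) a) &&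
              decide ((fun k => if k = t then (0 : Int) else 1) a < (fun k => if k = t then (0 : Int) else 1) b)))
          (by
            intro x b
            dsimp only
            rw [Bool.eq_iff_iff]
            by_cases hx : x = t <;> by_cases hb2 : b = t <;> simp [hx, hb2, ht] <;> omega) scores.keys none
        rw [show (List.foldl (fun b k => if b.1 = none ∨ scores.getD k 0 > b.2.1 ∨ (scores.getD k 0 = b.2.1 ∧ (if ¬t = "" ∧ k = t then (1:Int) else 0) > b.2.2)
                then (some k, scores.getD k 0, (if ¬t = "" ∧ k = t then (1:Int) else 0)) else b)
              ((none, 0, 0) : Option String × Int × Int) scores.keys) = _ from hB, encodeBest_fst]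
        rfl


-- ===== VERDICT (by name: the statement is the Claim_ definition above) =====
theorem aggregate_borda_spec : Claim_equal_aggregate_borda := by
  intro rankings labels tiebreak _ hpre
  unfold Spec_aggregate_borda aggregate_borda aggregate_borda_alt
  dsimp only
  rw [outer_eq_n, innerAB ((labels.length : Nat) : Int) (Int.natCast_nonneg _)]
  refine congrArg₂ Prod.mk ?_ (congrArg₂ Prod.mk rfl ?_)
  · exact winner_eq _ (scores_nodup _ _ _) tiebreak
  · exact (List.nil_append _).symm
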